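-- pv_equiv track=rewrite | github.com/surtr1/ibp-bstar-pathfinder | scripts/AStar-BStar New Implementation.py | get_orthogonal_priority
-- ===== SOURCE A (Python) =====
-- def get_orthogonal_priority(src, dest):
--     """
--     根据起点 src 和终点 dest 的相对位置，返回四个正交方向的优先级列表。
--
--     该实现基于原始 B* 算法的方向优先规则，使用笛卡尔坐标 (x, y)，其中 x 轴向右为正，y 轴向上为正。
--     在我们的网格中，列索引相当于 x，行索引相当于 y 向下为正，故需进行坐标转换。
--
--     返回的方向以 (row_delta, col_delta) 表示。
--     """
--     # 计算在笛卡尔坐标系下的差值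
--     # x 轴差：终点列索引减起点列索引
--     dx = dest[1] - src[1]
--     # y 轴差：终点行索引减起点行索引，但笛卡尔坐标的 y 轴向上为正，故取相反数
--     dy = -(dest[0] - src[0])
--     # 根据象限和差值大小决定优先级
--     if dx >= 0 and dy >= 0:  # 第一象限：右上
--         if dx > dy:
--             dirs = [(1,0), (0,1), (0,-1), (-1,0)]  # (dx,dy) 顺序
--         else:
--             dirs = [(0,1), (1,0), (-1,0), (0,-1)]
--     elif dx >= 0 and dy < 0:  # 第四象限：右下
--         if dx > -dy:
--             dirs = [(1,0), (0,-1), (0,1), (-1,0)]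
--         else:
--             dirs = [(0,-1), (1,0), (-1,0), (0,1)]
--     elif dx < 0 and dy >= 0:  # 第二象限：左上
--         if -dx > dy:
--             dirs = [(-1,0), (0,1), (0,-1), (1,0)]
--         else:
--             dirs = [(0,1), (-1,0), (1,0), (0,-1)]
--     else:  # 第三象限：左下
--         if -dx > -dy:
--             dirs = [(-1,0), (0,-1), (0,1), (1,0)]
--         else:
--             dirs = [(0,-1), (-1,0), (1,0), (0,1)]
--     # 将笛卡尔坐标方向转换为 (row_delta, col_delta)
--     return [(-dy_, dx_) for (dx_, dy_) in dirs]
-- ===== SOURCE B (Python) =====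
-- def get_orthogonal_priority(src, dest):
--     dx = dest[1] - src[1]
--     dy = -(dest[0] - src[0])
--     vertical_primary = abs(dy) >= abs(dx)
--
--     def rank(d):
--         r, c = d
--         if c != 0:  # horizontal move
--             toward = (c > 0) == (dx >= 0)
--             primary = not vertical_primary
--         else:       # vertical move
--             toward = (r < 0) == (dy >= 0)
--             primary = vertical_primary
--         if toward:
--             return 0 if primary else 1
--         else:
--             return 2 if not primary else 3
--
--     return sorted([(0, 1), (0, -1), (1, 0), (-1, 0)], key=rank)
-- ===== Notes on version B (the rewrite author's own statement) =====
-- stated objective: alternative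
-- what changed: Replaces A's 8-branch hard-coded direction table with generate-and-rank: B lists the four fixed orthogonal (row,col) directions, scores each one 0-3 by whether it points toward the destination on its axis and whether its axis is the primary one (|dy|>=|dx| makes vertical primary), and sorts the candidates by that score.
import Mathlib
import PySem

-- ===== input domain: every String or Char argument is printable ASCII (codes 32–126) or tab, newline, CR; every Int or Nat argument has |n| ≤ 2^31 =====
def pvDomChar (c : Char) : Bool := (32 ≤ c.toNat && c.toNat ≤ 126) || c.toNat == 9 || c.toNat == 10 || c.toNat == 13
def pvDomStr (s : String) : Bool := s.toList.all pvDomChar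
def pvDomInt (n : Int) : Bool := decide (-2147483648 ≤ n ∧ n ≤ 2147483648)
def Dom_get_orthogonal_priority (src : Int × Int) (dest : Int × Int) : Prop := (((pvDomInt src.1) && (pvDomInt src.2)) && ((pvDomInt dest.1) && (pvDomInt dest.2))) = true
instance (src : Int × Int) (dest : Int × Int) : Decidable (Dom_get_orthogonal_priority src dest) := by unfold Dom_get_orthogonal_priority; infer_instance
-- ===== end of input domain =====

-- B replaces A's 8-branch literal direction table by ranking the four fixed
-- candidate directions with a scoring function and sorting; objective: alternative.

-- ===== PORT A =====
def get_orthogonal_priority (src : Int × Int) (dest : Int × Int) : List (Int × Int) :=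
  let dx : Int := dest.2 - src.2
  let dy : Int := -(dest.1 - src.1)
  let dirs : List (Int × Int) :=
    if dx ≥ 0 ∧ dy ≥ 0 then
      if dx > dy then [(1,0), (0,1), (0,-1), (-1,0)]
      else [(0,1), (1,0), (-1,0), (0,-1)]
    else if dx ≥ 0 ∧ dy < 0 then
      if dx > -dy then [(1,0), (0,-1), (0,1), (-1,0)]
      else [(0,-1), (1,0), (-1,0), (0,1)]
    else if dx < 0 ∧ dy ≥ 0 then
      if -dx > dy then [(-1,0), (0,1), (0,-1), (1,0)]
      else [(0,1), (-1,0), (1,0), (0,-1)]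
    else
      if -dx > -dy then [(-1,0), (0,-1), (0,1), (1,0)]
      else [(0,-1), (-1,0), (1,0), (0,1)]
  dirs.map (fun p => (-p.2, p.1))

-- ===== PORT B =====
-- rank : each of the four (row_delta, col_delta) directions gets a score
-- (0 = toward dest on the primary axis … 3 = away from dest on the primary axis);
-- the candidates are then sorted by that score (PySem.List.sorted = Python's sorted).
def get_orthogonal_priority_alt (src : Int × Int) (dest : Int × Int) : List (Int × Int) :=
  let dx : Int := dest.2 - src.2
  let dy : Int := -(dest.1 - src.1)
  let vertical_primary : Bool := decide (|dy| ≥ |dx|)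
  let rank : Int × Int → Int := fun d =>
    if d.2 ≠ 0 then
      -- horizontal move
      if (decide (d.2 > 0) = decide (dx ≥ 0)) then
        (if ¬ (vertical_primary = true) then 0 else 1)
      else
        (if ¬ (vertical_primary = true) then 3 else 2)
    else
      -- vertical move
      if (decide (d.1 < 0) = decide (dy ≥ 0)) then
        (if vertical_primary = true then 0 else 1)
      else
        (if vertical_primary = true then 3 else 2)
  PySem.List.sorted [(0,1), (0,-1), (1,0), (-1,0)] rank false

-- ===== PRECONDITION & SPEC =====
def Spec_get_orthogonal_priority (src : Int × Int) (dest : Int × Int) (out : List (Int × Int)) : Prop := out = get_orthogonal_priority_alt src dest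
instance (src : Int × Int) (dest : Int × Int) (out : List (Int × Int)) : Decidable (Spec_get_orthogonal_priority src dest out) := by unfold Spec_get_orthogonal_priority; infer_instance

-- ===== CLAIM (what is proved, stated in full; the proofs are below) =====
def Claim_equal_get_orthogonal_priority : Prop := ∀ (src : Int × Int) (dest : Int × Int), Dom_get_orthogonal_priority src dest → Spec_get_orthogonal_priority src dest (get_orthogonal_priority src dest)

-- ===== LEMMAS AND PROOFS =====

-- ===== VERDICT (by name: the statement is the Claim_ definition above) =====
theorem get_orthogonal_priority_spec : Claim_equal_get_orthogonal_priority := by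
  intro src dest _
  unfold Spec_get_orthogonal_priority get_orthogonal_priority get_orthogonal_priority_alt
  by_cases h1 : (0:Int) ≤ dest.2 - src.2 <;>
  by_cases h2 : (0:Int) ≤ -(dest.1 - src.1) <;>
  by_cases h3 : (dest.2 - src.2).natAbs ≤ (-(dest.1 - src.1)).natAbs <;>
  · simp only [ge_iff_le, Int.abs_eq_natAbs, Nat.cast_le]
    simp only [h1, h2, h3, decide_true, decide_false, true_and, and_true, false_and,
      and_false, if_true, if_false]
    split_ifs <;> first | decide | omega | (exact absurd trivial ‹¬True›) | (exact False.elim ‹False›)
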